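-- pv_equiv track=rewrite | github.com/hirosuzuki/procon | atcoder/mujin-pc-2018/b.py | solve
-- ===== SOURCE A (Python) =====
-- def solve(A, S):
--     n = A
--     if n == 0:
--         return True
--     r = False
--     for c in S:
--         if c == "+":
--             n += 1
--         else:
--             n -= 1
--         if n == 0:
--             r = True
--     return r
-- ===== SOURCE B (Python) =====
-- def solve(A, S):
--     cur = A
--     lo = A
--     hi = A
--     for c in S:
--         if c == "+":
--             cur += 1
--         else:
--             cur -= 1
--         lo = min(lo, cur)
--         hi = max(hi, cur)
--     return lo <= 0 <= hi
-- ===== Notes on version B (the rewrite author's own statement) =====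
-- stated objective: alternative
-- what changed: Instead of carrying a hit-zero flag updated after every step, B tracks the min and max value the running counter ever takes (start included) and returns lo <= 0 <= hi, valid because +-1 steps visit a contiguous range.
import Mathlib
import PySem

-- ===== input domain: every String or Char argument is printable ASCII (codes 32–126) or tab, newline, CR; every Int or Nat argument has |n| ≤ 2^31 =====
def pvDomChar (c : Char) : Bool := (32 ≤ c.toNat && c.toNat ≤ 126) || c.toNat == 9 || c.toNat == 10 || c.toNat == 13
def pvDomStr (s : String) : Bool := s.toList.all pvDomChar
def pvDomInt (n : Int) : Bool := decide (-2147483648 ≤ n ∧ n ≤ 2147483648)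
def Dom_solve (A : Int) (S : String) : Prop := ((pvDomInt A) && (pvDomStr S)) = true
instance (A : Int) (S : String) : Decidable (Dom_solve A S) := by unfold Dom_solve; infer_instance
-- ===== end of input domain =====

-- B replaces A's hit-zero flag by tracking the min/max the ±1 counter ever reaches (start
-- included) and returns lo ≤ 0 ≤ hi; alternative decomposition, same O(n) cost.

-- ===== PORT A =====
def solve (A : Int) (S : String) : Bool :=
  let n := A
  if n = 0 then true
  else
    (S.toList.foldl
      (fun (st : Int × Bool) c =>
        let n := if c = '+' then st.1 + 1 else st.1 - 1
        (n, if n = 0 then true else st.2))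
      (n, false)).2

-- ===== PORT B =====
def solve_alt (A : Int) (S : String) : Bool :=
  let st := S.toList.foldl
    (fun (st : Int × Int × Int) c =>
      let cur := if c = '+' then st.1 + 1 else st.1 - 1
      (cur, min st.2.1 cur, max st.2.2 cur))
    (A, A, A)
  decide (st.2.1 ≤ 0 ∧ 0 ≤ st.2.2)

-- ===== PRECONDITION & SPEC =====
def Spec_solve (A : Int) (S : String) (out : Bool) : Prop := out = solve_alt A S
instance (A : Int) (S : String) (out : Bool) : Decidable (Spec_solve A S out) := by unfold Spec_solve; infer_instance

-- ===== CLAIM (what is proved, stated in full; the proofs are below) =====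
def Claim_equal_solve : Prop := ∀ (A : Int) (S : String), Dom_solve A S → Spec_solve A S (solve A S)

-- ===== LEMMAS AND PROOFS =====

-- A's loop body and B's loop body as named functions
def stepA (st : Int × Bool) (c : Char) : Int × Bool :=
  let n := if c = '+' then st.1 + 1 else st.1 - 1
  (n, if n = 0 then true else st.2)

def stepB (st : Int × Int × Int) (c : Char) : Int × Int × Int :=
  let cur := if c = '+' then st.1 + 1 else st.1 - 1
  (cur, min st.2.1 cur, max st.2.2 cur)

-- A's flag is just OR-accumulated: the carried flag factors out
theorem foldA_flag (cs : List Char) (n : Int) (r : Bool) :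
    (cs.foldl stepA (n, r)).2 = (r || (cs.foldl stepA (n, false)).2) := by
  induction cs generalizing n r with
  | nil => simp
  | cons c cs ih =>
    simp only [List.foldl, stepA]
    rw [ih (if c = '+' then n + 1 else n - 1) (if (if c = '+' then n + 1 else n - 1) = 0 then true else r),
        ih (if c = '+' then n + 1 else n - 1) (if (if c = '+' then n + 1 else n - 1) = 0 then true else false)]
    by_cases hz : (if c = '+' then n + 1 else n - 1) = 0 <;> simp [hz]

-- core invariant: B's fold answers "did A hit zero, or was 0 already in [lo,hi]?"
theorem core (cs : List Char) (n lo hi : Int) (h1 : lo ≤ n) (h2 : n ≤ hi) :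
    (decide ((cs.foldl stepB (n, lo, hi)).2.1 ≤ 0 ∧ 0 ≤ (cs.foldl stepB (n, lo, hi)).2.2))
      = ((cs.foldl stepA (n, false)).2 || decide (lo ≤ 0 ∧ 0 ≤ hi)) := by
  induction cs generalizing n lo hi with
  | nil => simp
  | cons c cs ih =>
    simp only [List.foldl, stepA, stepB]
    set n' : Int := if c = '+' then n + 1 else n - 1 with hn'
    have hn : n' = n + 1 ∨ n' = n - 1 := by
      by_cases h : c = '+' <;> simp [hn', h]
    rw [ih n' (min lo n') (max hi n') (min_le_right _ _) (le_max_right _ _)]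
    rw [foldA_flag cs n' (if n' = 0 then true else false)]
    have key : (decide (min lo n' ≤ 0 ∧ 0 ≤ max hi n'))
        = ((if n' = 0 then true else false) || decide (lo ≤ 0 ∧ 0 ≤ hi)) := by
      by_cases hz : n' = 0
      · have h0 : (decide (min lo n' ≤ 0 ∧ 0 ≤ max hi n')) = true := by
          rw [decide_eq_true_iff]
          constructor
          · exact le_trans (min_le_right _ _) (le_of_eq hz)
          · exact le_trans (ge_of_eq hz) (le_max_right _ _)
        rw [h0, hz]; simp
      · have hiff : (min lo n' ≤ 0 ∧ 0 ≤ max hi n') ↔ (lo ≤ 0 ∧ 0 ≤ hi) := by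
          rw [min_le_iff, le_max_iff]
          rcases hn with h | h <;> omega
        rw [if_neg hz, Bool.false_or]
        exact decide_eq_decide.mpr hiff
    rw [key]
    cases (cs.foldl stepA (n', false)).2 <;> cases (if n' = 0 then true else false) <;>
      cases (decide (lo ≤ 0 ∧ 0 ≤ hi)) <;> simp

-- ===== VERDICT (by name: the statement is the Claim_ definition above) =====
theorem solve_spec : Claim_equal_solve := by
  intro A S _
  show solve A S = solve_alt A S
  have hcore := core S.toList A A A le_rfl le_rfl
  unfold solve solve_alt
  rw [show (S.toList.foldl
      (fun (st : Int × Int × Int) c =>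
        let cur := if c = '+' then st.1 + 1 else st.1 - 1
        (cur, min st.2.1 cur, max st.2.2 cur)) (A, A, A))
      = S.toList.foldl stepB (A, A, A) from rfl]
  by_cases h : A = 0
  · rw [if_pos h, hcore]
    have h0 : decide (A ≤ 0 ∧ 0 ≤ A) = true := by rw [decide_eq_true_iff]; omega
    simp [h0]
  · rw [if_neg h]
    rw [show (S.toList.foldl
        (fun (st : Int × Bool) c =>
          let n := if c = '+' then st.1 + 1 else st.1 - 1
          (n, if n = 0 then true else st.2)) (A, false))
        = S.toList.foldl stepA (A, false) from rfl]
    rw [hcore]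
    have h0 : decide (A ≤ 0 ∧ 0 ≤ A) = false := by rw [decide_eq_false_iff_not]; omega
    simp [h0]
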